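-- pv_equiv track=rewrite | github.com/NHLOCAL/Singles-Sorter | machine-learn/scrape_data/song-list-processor.py | filter_songs_by_artists
-- ===== SOURCE A (Python) =====
-- def filter_songs_by_artists(songs, artists):
--     matched_songs = []
--     unmatched_songs = []
--     for song in songs:
--         if any(artist.lower() in song.lower() for artist in artists):
--             matched_songs.append(song)
--         else:
--             unmatched_songs.append(song)
--     return matched_songs, unmatched_songs
-- ===== SOURCE B (Python) =====
-- def filter_songs_by_artists(songs, artists):
--     # Set-based window matching: dedup the lowered artists into a set, collect
--     # their distinct lengths, and test each length-L window of the lowered song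
--     # for membership in the set.
--     patterns = set(artist.lower() for artist in artists)
--     lengths = set(len(p) for p in patterns)
--
--     def hit(song):
--         low = song.lower()
--         n = len(low)
--         return any(low[i:i + L] in patterns
--                    for L in lengths
--                    for i in range(n - L + 1))
--
--     return [s for s in songs if hit(s)], [s for s in songs if not hit(s)]
-- ===== Notes on version B (the rewrite author's own statement) =====
-- stated objective: faster
-- what changed: A tests every lowered artist as a substring of each lowered song; B dedups the lowered artists into a set, collects their distinct lengths, and tests each length-L window of the lowered song for membership in that set, replacing the per-artist scan by per-window set lookups.
import Mathlib
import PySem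

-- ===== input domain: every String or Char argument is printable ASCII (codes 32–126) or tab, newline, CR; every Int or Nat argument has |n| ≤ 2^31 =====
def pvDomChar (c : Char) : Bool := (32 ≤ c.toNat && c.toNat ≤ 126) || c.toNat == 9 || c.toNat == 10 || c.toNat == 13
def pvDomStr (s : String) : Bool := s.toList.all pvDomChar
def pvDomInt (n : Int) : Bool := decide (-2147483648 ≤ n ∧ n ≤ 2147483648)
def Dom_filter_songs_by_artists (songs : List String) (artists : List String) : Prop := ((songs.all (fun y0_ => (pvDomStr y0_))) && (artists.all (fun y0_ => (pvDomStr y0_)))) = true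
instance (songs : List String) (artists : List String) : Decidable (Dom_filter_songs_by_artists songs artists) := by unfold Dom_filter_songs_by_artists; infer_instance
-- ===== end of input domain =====

-- B replaces A's per-artist substring search by set-based window matching (dedup'd
-- lowered artists in a set, each song's length-L windows looked up per distinct
-- length L); same partition, measured faster on the generated timing inputs.


-- ===== PORT A =====
-- for song in songs: if any(artist.lower() in song.lower() for artist in artists): …
def filter_songs_by_artists (songs : List String) (artists : List String) : List String × List String :=
  songs.foldl
    (fun (acc : List String × List String) song =>
      if artists.any (fun artist => PySem.Str.isIn (PySem.Str.lower artist) (PySem.Str.lower song)) then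
        (acc.1 ++ [song], acc.2)
      else
        (acc.1, acc.2 ++ [song]))
    ([], [])

-- ===== PORT B =====
-- any(low[i:i+L] in patterns for L in lengths for i in range(n - L + 1))
def pvWindowHit (patterns : PySem.Set String) (lengths : PySem.Set Int) (song : String) : Bool :=
  let low := PySem.Str.lower song
  let n : Int := (PySem.Str.len low : Int)
  lengths.any (fun L =>
    (PySem.List.pyRange 0 (n - L + 1) 1).any (fun i =>
      PySem.Set.contains patterns (PySem.Str.slice low (some i) (some (i + L)))))

def filter_songs_by_artists_alt (songs : List String) (artists : List String) : List String × List String :=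
  let patterns : PySem.Set String := PySem.Set.ofList (artists.map (fun artist => PySem.Str.lower artist))
  let lengths : PySem.Set Int := PySem.Set.ofList (patterns.map (fun p => (PySem.Str.len p : Int)))
  (songs.filter (fun s => pvWindowHit patterns lengths s),
   songs.filter (fun s => ! pvWindowHit patterns lengths s))

-- ===== PRECONDITION & SPEC =====
def Spec_filter_songs_by_artists (songs : List String) (artists : List String) (out : List String × List String) : Prop := out = filter_songs_by_artists_alt songs artists
instance (songs : List String) (artists : List String) (out : List String × List String) : Decidable (Spec_filter_songs_by_artists songs artists out) := by unfold Spec_filter_songs_by_artists; infer_instance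

-- ===== CLAIM (what is proved, stated in full; the proofs are below) =====
def Claim_equal_filter_songs_by_artists : Prop := ∀ (songs : List String) (artists : List String), Dom_filter_songs_by_artists songs artists → Spec_filter_songs_by_artists songs artists (filter_songs_by_artists songs artists)

-- ===== LEMMAS AND PROOFS =====

-- A's accumulator loop, run from any start state, is append-of-filters
theorem foldl_partition (p : String → Bool) (songs : List String) (m u : List String) :
    songs.foldl
      (fun (acc : List String × List String) song =>
        if p song then (acc.1 ++ [song], acc.2) else (acc.1, acc.2 ++ [song]))
      (m, u)
    = (m ++ songs.filter p, u ++ songs.filter (fun s => ! p s)) := by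
  induction songs generalizing m u with
  | nil => simp
  | cons x xs ih =>
      by_cases hx : p x <;> simp [hx, ih]

theorem infix_drop_take (cs : List Char) (a b : Nat) : (cs.drop a).take b <:+: cs :=
  (List.take_prefix b (cs.drop a)).isInfix.trans (List.drop_suffix a cs).isInfix


-- B's per-song window test agrees with A's per-song any-substring test
theorem pvWindowHit_eq (artists : List String) (song : String) :
    pvWindowHit (PySem.Set.ofList (artists.map (fun artist => PySem.Str.lower artist)))
      (PySem.Set.ofList ((PySem.Set.ofList (artists.map (fun artist => PySem.Str.lower artist))).map
        (fun p => (PySem.Str.len p : Int)))) song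
    = artists.any (fun artist => PySem.Str.isIn (PySem.Str.lower artist) (PySem.Str.lower song)) := by
  rw [Bool.eq_iff_iff]
  unfold pvWindowHit
  simp only [List.any_eq_true, PySem.Set.mem_ofList, List.mem_map,
    PySem.List.mem_pyRange_one, PySem.Set.contains_iff, PySem.Str.isIn_iff_infix]
  constructor
  · rintro ⟨L, ⟨p, hp, rfl⟩, i, ⟨hi0, _⟩, hw⟩
    obtain ⟨a, ha, hal⟩ := hw
    refine ⟨a, ha, ?_⟩
    have hL0 : (0:Int) ≤ (PySem.Str.len p : Int) := Int.natCast_nonneg _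
    have htl : (PySem.Str.lower a).toList
        = ((PySem.Str.lower song).toList.drop i.toNat).take
            ((i + (PySem.Str.len p : Int)).toNat - i.toNat) := by
      rw [hal]
      simp
      rw [PySem.List.slice_toNat _ hi0 (by omega)]
    rw [htl]
    exact infix_drop_take _ _ _
  · rintro ⟨a, ha, hinf⟩
    obtain ⟨s, t, hst⟩ := hinf
    refine ⟨((PySem.Str.lower a).toList.length : Int),
            ⟨PySem.Str.lower a, ⟨a, ha, rfl⟩, by simp⟩,
            (s.length : Int), ⟨Int.natCast_nonneg _, ?_⟩, ?_⟩
    · have hn : (PySem.Str.lower song).toList.length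
          = s.length + (PySem.Str.lower a).toList.length + t.length := by
        rw [← hst]; simp; omega
      simp only [PySem.Str.len_eq, hn]
      push_cast
      omega
    · refine ⟨a, ha, ?_⟩
      apply String.toList_inj.mp
      rw [PySem.Str.toList_slice]
      simp only [PySem.Chars.slice_eq_listSlice, PySem.List.slice_natCast_add]
      rw [← hst]
      rw [List.append_assoc, List.drop_left, List.take_left]

-- ===== VERDICT (by name: the statement is the Claim_ definition above) =====
theorem filter_songs_by_artists_spec : Claim_equal_filter_songs_by_artists := by
  intro songs artists _
  unfold Spec_filter_songs_by_artists filter_songs_by_artists filter_songs_by_artists_alt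
  rw [foldl_partition]
  simp only [pvWindowHit_eq, List.nil_append]
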